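-- pv_equiv track=rewrite | github.com/ideophagous/bright_spot_distance | bright_spot_distance.py | get_bright_spot
-- ===== SOURCE A (Python) =====
-- def get_bright_spot(neighborhood_list):
--     try:
--         max = len(neighborhood_list[0])
--         index_max = 0
--         for i in range(1,len(neighborhood_list)):
--             if(len(neighborhood_list[i])>max):
--                 max = len(neighborhood_list[i])
--                 index_max = i
--         return neighborhood_list[index_max]
--     except:
--         return []
-- ===== SOURCE B (Python) =====
-- def get_bright_spot(neighborhood_list):
--     try:
--         return sorted(neighborhood_list, key=len, reverse=True)[0]
--     except:
--         return []
-- ===== Notes on version B (the rewrite author's own statement) =====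
-- stated objective: simpler
-- what changed: Replaces the manual index-tracking max scan over range(1,len) with a stable descending sort by length followed by taking the first element (first-on-ties preserved by sort stability).
import Mathlib
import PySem

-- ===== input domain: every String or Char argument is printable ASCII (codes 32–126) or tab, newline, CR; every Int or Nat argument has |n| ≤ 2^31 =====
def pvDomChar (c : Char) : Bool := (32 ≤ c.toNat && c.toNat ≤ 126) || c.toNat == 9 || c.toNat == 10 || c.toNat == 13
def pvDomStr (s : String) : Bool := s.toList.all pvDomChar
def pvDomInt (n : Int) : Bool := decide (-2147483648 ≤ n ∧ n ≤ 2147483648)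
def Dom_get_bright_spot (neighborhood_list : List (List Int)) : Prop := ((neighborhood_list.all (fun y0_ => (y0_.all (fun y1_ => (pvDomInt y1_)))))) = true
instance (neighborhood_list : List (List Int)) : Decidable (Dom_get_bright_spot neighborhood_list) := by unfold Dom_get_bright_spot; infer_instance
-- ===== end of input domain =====

-- B replaces A's manual index-tracking max scan with a stable descending sort by
-- length followed by taking the first element (simpler; not faster).


-- ===== PORT A =====
-- A: nl[0] raises IndexError on the empty list; the bare except returns [].
-- On a nonempty list the loop over range(1, len) tracks (max, index_max).
def get_bright_spot (neighborhood_list : List (List Int)) : List Int :=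
  match neighborhood_list with
  | [] => []            -- `neighborhood_list[0]` raises IndexError; `except: return []`
  | x :: _ =>
    let st :=
      (PySem.List.pyRange 1 (PySem.List.len neighborhood_list) 1).foldl
        (fun (acc : Int × Int) i =>
          if (PySem.List.len (PySem.List.pyGetD neighborhood_list i []) > acc.1)
          then (PySem.List.len (PySem.List.pyGetD neighborhood_list i []), i)
          else acc)
        ((PySem.List.len x), (0 : Int))
    PySem.List.pyGetD neighborhood_list st.2 []

-- ===== PORT B =====
-- B: sorted(nl, key=len, reverse=True)[0]; the [0] raises IndexError on [] → except returns [].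
def get_bright_spot_alt (neighborhood_list : List (List Int)) : List Int :=
  match PySem.List.sorted neighborhood_list (fun y => PySem.List.len y) true with
  | [] => []            -- sorted([]) == [], so [0] raises IndexError; `except: return []`
  | h :: _ => h

-- ===== PRECONDITION & SPEC =====
def Spec_get_bright_spot (neighborhood_list : List (List Int)) (out : List Int) : Prop := out = get_bright_spot_alt neighborhood_list
instance (neighborhood_list : List (List Int)) (out : List Int) : Decidable (Spec_get_bright_spot neighborhood_list out) := by unfold Spec_get_bright_spot; infer_instance

-- ===== CLAIM (what is proved, stated in full; the proofs are below) =====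
def Claim_equal_get_bright_spot : Prop := ∀ (neighborhood_list : List (List Int)), Dom_get_bright_spot neighborhood_list → Spec_get_bright_spot neighborhood_list (get_bright_spot neighborhood_list)

-- ===== LEMMAS AND PROOFS =====

-- The common value both programs compute on a nonempty list: a left fold keeping
-- the current best, replaced only on a strictly longer element (first-on-ties).
def pvFirstMax (b : List Int) (rest : List (List Int)) : List Int :=
  rest.foldl (fun b y => if (b.length : Int) < (y.length : Int) then y else b) b

-- A's index loop computes pvFirstMax: invariant over the remaining range.
lemma pvLoopA (nl : List (List Int)) :
    ∀ (n : Nat) (a m i : Int) (b : List Int), 0 ≤ a → a + n = nl.length →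
      PySem.List.pyGetD nl i [] = b → m = (b.length : Int) →
      PySem.List.pyGetD nl
        ((PySem.List.pyRange a (nl.length : Int) 1).foldl
          (fun (acc : Int × Int) j =>
            if (PySem.List.len (PySem.List.pyGetD nl j []) > acc.1)
            then (PySem.List.len (PySem.List.pyGetD nl j []), j)
            else acc) (m, i)).2 []
        = pvFirstMax b (nl.drop a.toNat) := by
  intro n
  induction n with
  | zero =>
    intro a m i b ha hlen hb hm
    rw [PySem.List.pyRange_one_eq_nil (by omega)]
    rw [List.drop_of_length_le (by omega)]
    simpa [pvFirstMax] using hb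
  | succ k ih =>
    intro a m i b ha hlen hb hm
    have halt : a < (nl.length : Int) := by omega
    rw [PySem.List.pyRange_one_cons halt]
    have haNat : a.toNat < nl.length := by omega
    have hget : PySem.List.pyGetD nl a [] = nl[a.toNat] :=
      PySem.List.pyGetD_eq_getElem nl [] ha halt
    have hdrop : nl.drop a.toNat = nl[a.toNat] :: nl.drop (a + 1).toNat := by
      have h1 : (a + 1).toNat = a.toNat + 1 := by omega
      rw [h1]
      exact List.drop_eq_getElem_cons haNat
    simp only [List.foldl_cons, hget, hdrop, pvFirstMax, PySem.List.len_eq]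
    by_cases hc : (b.length : Int) < ((nl[a.toNat] : List Int).length : Int)
    · have hcond : ((nl[a.toNat] : List Int).length : Int) > m := by omega
      rw [if_pos (by simpa using hcond), if_pos hc]
      exact ih (a + 1) _ a nl[a.toNat] (by omega) (by omega) hget rfl
    · have hcond : ¬ (((nl[a.toNat] : List Int).length : Int) > m) := by omega
      rw [if_neg (by simpa using hcond), if_neg hc]
      exact ih (a + 1) m i b (by omega) (by omega) hb hm

-- Head of B's insertion fold (stable descending sort) is pvFirstMax.
lemma pvHeadFoldIns :
    ∀ (xs : List (List Int)) (acc : List (List Int)) (b : List Int),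
      acc.head? = some b →
      ((xs.foldl
          (fun acc x =>
            PySem.List.insertBy
              (fun a c => decide ((fun y => PySem.List.len y) c < (fun y => PySem.List.len y) a)) x acc)
          acc).head?
        = some (pvFirstMax b xs)) := by
  intro xs
  induction xs with
  | nil => intro acc b hb; simpa [pvFirstMax] using hb
  | cons y ys ih =>
    intro acc b hb
    obtain ⟨h, t, rfl⟩ : ∃ h t, acc = h :: t := by
      cases acc with
      | nil => simp at hb
      | cons h t => exact ⟨h, t, rfl⟩
    have hb' : h = b := by simpa using hb
    subst hb'
    simp only [List.foldl_cons, PySem.List.insertBy, PySem.List.len_eq]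
    by_cases hc : (h.length : Int) < (y.length : Int)
    · rw [if_pos (by simpa using hc)]
      have : pvFirstMax h (y :: ys) = pvFirstMax y ys := by
        simp only [pvFirstMax, List.foldl_cons, if_pos hc]
      rw [this]
      exact ih _ y rfl
    · rw [if_neg (by simpa using hc)]
      have : pvFirstMax h (y :: ys) = pvFirstMax h ys := by
        simp only [pvFirstMax, List.foldl_cons, if_neg hc]
      rw [this]
      exact ih _ h rfl

-- ===== VERDICT (by name: the statement is the Claim_ definition above) =====
theorem get_bright_spot_spec : Claim_equal_get_bright_spot := by
  intro nl _
  unfold Spec_get_bright_spot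
  cases nl with
  | nil => simp [get_bright_spot, get_bright_spot_alt, PySem.List.sorted]
  | cons x rest =>
    have hA :
        get_bright_spot (x :: rest) = pvFirstMax x rest := by
      have h0 : PySem.List.pyGetD (x :: rest) 0 [] = x :=
        PySem.List.pyGetD_eq_getElem (x :: rest) [] (by omega) (by simp)
      have := pvLoopA (x :: rest) rest.length 1 (x.length : Int) 0 x
        (by omega) (by push_cast [List.length_cons]; omega) h0 rfl
      simp only [get_bright_spot, PySem.List.len_eq] at this ⊢
      simpa using this
    have hB :
        (PySem.List.sorted (x :: rest) (fun y => PySem.List.len y) true).head?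
          = some (pvFirstMax x rest) := by
      rw [PySem.List.sorted_rev_eq_foldl_insertBy]
      simp only [List.foldl_cons, PySem.List.insertBy]
      exact pvHeadFoldIns rest [x] x rfl
    rw [hA]
    unfold get_bright_spot_alt
    cases hs : PySem.List.sorted (x :: rest) (fun y => PySem.List.len y) true with
    | nil => rw [hs] at hB; simp at hB
    | cons h t => rw [hs] at hB; simp at hB; exact hB.symm
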